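-- pv_equiv track=rewrite | github.com/chaitanya1270/Scheduler-AI | core/suggest_alternative.py | suggest_alternatives
-- ===== SOURCE A (Python) =====
-- def suggest_alternatives(common_slots, priority, participants_availability, meeting_duration):
--     """
--     Suggest alternative time slots when no perfect common slot is available.
--
--     Parameters:
--     common_slots (list): List of common available time slots for participants.
--     priority (str): Priority of the meeting (e.g., 'high', 'medium', 'low').
--     participants_availability (dict): Availability of each participant, including their busy slots.
--     meeting_duration (timedelta): Duration of the required meeting.
--
--     Returns:
--     tuple: The best alternative time slot (start, end), or None if no suitable slot is found.
--     """
--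
--     # If high priority, try to reschedule conflicting lower-priority meetings
--     if priority == 'high':
--         # Check each participant's availability and reschedule low-priority meetings
--         for participant, availability in participants_availability.items():
--             # Look for conflicts with lower-priority meetings and attempt to reschedule them
--             for busy_slot in availability.get('busy', []):
--                 # If a conflict exists in the common slots, we try to move the conflicting meeting
--                 if any(busy_slot[0] <= common_slot[0] <= busy_slot[1] for common_slot in common_slots):
--                     # We assume we can reschedule the lower-priority meeting (e.g., freeing the slot)
--                     # Remove the conflict to make room for this high-priority meeting
--                     availability['busy'].remove(busy_slot)
--                     # After rescheduling, check if we can find a free slot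
--                     new_slot = find_free_slot(availability, meeting_duration)
--                     if new_slot:
--                         return new_slot
--
--     # If medium priority, suggest partial availability
--     elif priority == 'medium':
--         # Find slots where only optional participants are unavailable
--         alternative_slots = []
--         for common_slot in common_slots:
--             unavailable_count = 0
--             for participant, availability in participants_availability.items():
--                 if any(busy_slot[0] <= common_slot[0] <= busy_slot[1] for busy_slot in availability.get('busy', [])):
--                     unavailable_count += 1
--             # If a majority of required participants are available, suggest the slot
--             if unavailable_count == 0:  # All participants are free
--                 return common_slot
--             elif unavailable_count <= len(participants_availability) // 2:  # At least half the participants are free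
--                 alternative_slots.append(common_slot)
--         # Return the best partial slot
--         if alternative_slots:
--             return alternative_slots[0]
--
--     # If low priority, suggest slots with the most participants available
--     elif priority == 'low':
--         # Find slots with the most participants available
--         best_slot = None
--         max_available = 0
--         for common_slot in common_slots:
--             available_count = 0
--             for participant, availability in participants_availability.items():
--                 if not any(busy_slot[0] <= common_slot[0] <= busy_slot[1] for busy_slot in availability.get('busy', [])):
--                     available_count += 1
--             # Choose the slot with the highest number of available participants
--             if available_count > max_available:
--                 max_available = available_count
--                 best_slot = common_slot
--         return best_slot
--
--     # If no slot could be found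
--     return None
--
-- def find_free_slot(availability, meeting_duration):
--     """
--     Find the next free slot in the participant's availability that can accommodate the meeting duration.
--
--     Parameters:
--     availability (dict): The participant's availability and busy slots.
--     meeting_duration (timedelta): Duration of the required meeting.
--
--     Returns:
--     tuple: The next available slot (start, end) or None if no suitable slot is found.
--     """
--     for free_slot in availability.get('free', []):
--         start, end = free_slot
--         if (end - start) >= meeting_duration:
--             return (start, start + meeting_duration)
--     return None
-- ===== SOURCE B (Python) =====
-- def _merge_busy(busy):
--     """Sort busy intervals by start and sweep them into a disjoint,
--     start-sorted list covering the same points."""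
--     merged = []
--     for a, b in sorted(busy, key=lambda s: s[0]):
--         if merged and a <= merged[-1][1]:
--             if b > merged[-1][1]:
--                 merged[-1] = (merged[-1][0], b)
--         else:
--             merged.append((a, b))
--     return merged
--
--
-- def _busy_at(merged, x):
--     """Point containment in the merged intervals by binary search."""
--     lo, hi = 0, len(merged)
--     while lo < hi:
--         mid = (lo + hi) // 2
--         if merged[mid][0] <= x:
--             lo = mid + 1
--         else:
--             hi = mid
--     return lo > 0 and x <= merged[lo - 1][1]
--
--
-- def _try_participant(availability, common_slots, meeting_duration):
--     """If this participant's busy set contains some slot start, propose the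
--     first adequate free slot of this participant (None otherwise)."""
--     merged = _merge_busy(availability.get('busy', []))
--     if not any(_busy_at(merged, slot[0]) for slot in common_slots):
--         return None
--     return next(((s, s + meeting_duration)
--                  for s, e in availability.get('free', [])
--                  if e - s >= meeting_duration), None)
--
--
-- def _busy_counts(common_slots, participants_availability):
--     """counts[i] = number of participants busy at common_slots[i][0],
--     accumulated participant-by-participant (transposed traversal)."""
--     counts = [0] * len(common_slots)
--     for availability in participants_availability.values():
--         merged = _merge_busy(availability.get('busy', []))
--         for i in range(len(common_slots)):
--             if _busy_at(merged, common_slots[i][0]):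
--                 counts[i] += 1
--     return counts
--
--
-- def suggest_alternatives(common_slots, priority, participants_availability, meeting_duration):
--     if priority == 'high':
--         for availability in participants_availability.values():
--             found = _try_participant(availability, common_slots, meeting_duration)
--             if found is not None:
--                 return found
--         return None
--
--     if priority not in ('medium', 'low'):
--         return None
--
--     counts = _busy_counts(common_slots, participants_availability)
--     n = len(participants_availability)
--
--     if priority == 'medium':
--         for slot, c in zip(common_slots, counts):
--             if c == 0:
--                 return slot
--         half = n // 2
--         for slot, c in zip(common_slots, counts):
--             if c <= half:
--                 return slot
--         return None
--
--     # low: the first slot attaining the maximal (positive) number of free participants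
--     frees = [n - c for c in counts]
--     m = 0
--     for f in frees:
--         m = max(m, f)
--     if m == 0:
--         return None
--     for slot, f in zip(common_slots, frees):
--         if f == m:
--             return slot
-- ===== Notes on version B (the rewrite author's own statement) =====
-- stated objective: alternative
-- what changed: B merges each participant's busy list once (sort+sweep) and answers slot-start containment by binary search; the medium/low branches are computed from a single transposed busy-count table per slot (participant-outer accumulation) read back in staged passes (first zero-count slot, then first half-count slot; running max then first argmax), and the high branch maps each participant to an optional proposal and takes the first hit instead of simulating in-place removal of busy entries (no speed is claimed: a timing run showed no measurable win on the generated inputs).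
import Mathlib
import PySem

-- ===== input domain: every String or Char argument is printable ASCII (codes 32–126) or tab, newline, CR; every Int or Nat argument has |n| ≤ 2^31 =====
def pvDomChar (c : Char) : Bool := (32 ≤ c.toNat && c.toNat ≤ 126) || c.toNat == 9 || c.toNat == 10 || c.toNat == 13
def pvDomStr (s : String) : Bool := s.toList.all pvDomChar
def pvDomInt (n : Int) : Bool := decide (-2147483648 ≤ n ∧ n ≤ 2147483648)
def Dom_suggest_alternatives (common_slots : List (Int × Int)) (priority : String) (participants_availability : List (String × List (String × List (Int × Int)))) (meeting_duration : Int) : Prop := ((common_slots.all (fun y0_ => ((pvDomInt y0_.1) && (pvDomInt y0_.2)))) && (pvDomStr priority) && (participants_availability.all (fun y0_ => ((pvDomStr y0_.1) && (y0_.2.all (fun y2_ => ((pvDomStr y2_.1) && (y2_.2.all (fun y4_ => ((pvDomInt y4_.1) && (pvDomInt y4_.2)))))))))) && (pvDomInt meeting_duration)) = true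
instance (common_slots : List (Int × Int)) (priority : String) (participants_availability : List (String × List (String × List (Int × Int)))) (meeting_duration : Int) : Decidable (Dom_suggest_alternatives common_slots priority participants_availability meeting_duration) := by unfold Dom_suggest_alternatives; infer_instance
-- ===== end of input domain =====

-- B merges each participant's busy list once and answers slot-start containment by binary search,
-- computes medium/low answers from one transposed busy-count table read in staged passes, and maps
-- the high branch to "first participant proposal" (objective: alternative algorithm). A also mutates
-- busy lists in place in the 'high' branch (B does not); the equivalence proved is about the RETURN
-- value only.

-- ===== PORT A =====
-- python dict .get(k, []) on the availability association lists (python dict keys are unique)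
def dictGetD (d : List (String × List (Int × Int))) (k : String) : List (Int × Int) :=
  match d with
  | [] => []
  | (k', v) :: rest => if k' = k then v else dictGetD rest k

-- any(busy_slot[0] <= common_slot[0] <= busy_slot[1] for common_slot in common_slots)
def pvConflictA (common_slots : List (Int × Int)) (b : Int × Int) : Bool :=
  common_slots.any (fun s => decide (b.1 ≤ s.1 ∧ s.1 ≤ b.2))

def ffsGo (free : List (Int × Int)) (dur : Int) : Option (Int × Int) :=
  match free with
  | [] => none
  | (s, e) :: rest => if e - s ≥ dur then some (s, s + dur) else ffsGo rest dur

def find_free_slot (availability : List (String × List (Int × Int))) (meeting_duration : Int) : Option (Int × Int) :=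
  ffsGo (dictGetD availability "free") meeting_duration

theorem pv_remove_getD_length_le (lst : List (Int × Int)) (b : Int × Int) :
    ((PySem.List.remove? lst b).getD lst).length ≤ lst.length := by
  by_cases hb : b ∈ lst
  · rw [PySem.List.remove?_eq_some_erase lst b hb]
    simpa using List.length_erase_le (a := b) (l := lst)
  · rw [(PySem.List.remove?_eq_none_iff lst b).mpr hb]
    simp

-- CPython's `for busy_slot in lst` with `lst.remove(busy_slot)` in the body: index-based
-- iteration over the shrinking list (the internal index still advances after a removal).
-- `availability['busy'].remove(...)` mutates only 'busy', which find_free_slot never reads,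
-- so find_free_slot is called on the unchanged availability.
def highGo (slots : List (Int × Int)) (av : List (String × List (Int × Int))) (dur : Int)
    (lst : List (Int × Int)) (i : Nat) : Option (Int × Int) :=
  if h : i < lst.length then
    if pvConflictA slots lst[i] then
      match find_free_slot av dur with
      | some v => some v
      | none => highGo slots av dur ((PySem.List.remove? lst lst[i]).getD lst) (i + 1)
    else highGo slots av dur lst (i + 1)
  else none
termination_by lst.length - i
decreasing_by
  · have := pv_remove_getD_length_le lst lst[i]
    omega
  · omega

def highLoop (slots : List (Int × Int)) (dur : Int) :
    List (String × List (String × List (Int × Int))) → Option (Int × Int)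
  | [] => none
  | (_, av) :: rest =>
    match highGo slots av dur (dictGetD av "busy") 0 with
    | some v => some v
    | none => highLoop slots dur rest

def unavailCount (parts : List (String × List (String × List (Int × Int)))) (x : Int) : Int :=
  parts.foldl (fun c p => if (dictGetD p.2 "busy").any (fun b => decide (b.1 ≤ x ∧ x ≤ b.2)) then c + 1 else c) 0

def medLoop (parts : List (String × List (String × List (Int × Int)))) (half : Int) :
    List (Int × Int) → List (Int × Int) → Option (Int × Int)
  | acc, [] => acc.head?
  | acc, slot :: rest =>
    let c := unavailCount parts slot.1
    if c = 0 then some slot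
    else if c ≤ half then medLoop parts half (acc ++ [slot]) rest
    else medLoop parts half acc rest

def availCount (parts : List (String × List (String × List (Int × Int)))) (x : Int) : Int :=
  parts.foldl (fun c p => if (dictGetD p.2 "busy").any (fun b => decide (b.1 ≤ x ∧ x ≤ b.2)) then c else c + 1) 0

def lowLoop (parts : List (String × List (String × List (Int × Int)))) :
    Option (Int × Int) → Int → List (Int × Int) → Option (Int × Int)
  | best, _, [] => best
  | best, maxAv, slot :: rest =>
    let c := availCount parts slot.1
    if c > maxAv then lowLoop parts (some slot) c rest else lowLoop parts best maxAv rest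

def suggest_alternatives (common_slots : List (Int × Int)) (priority : String) (participants_availability : List (String × List (String × List (Int × Int)))) (meeting_duration : Int) : Option (Int × Int) :=
  if priority = "high" then highLoop common_slots meeting_duration participants_availability
  else if priority = "medium" then
    medLoop participants_availability (PySem.Int.floordiv (participants_availability.length : Int) 2) [] common_slots
  else if priority = "low" then
    lowLoop participants_availability none 0 common_slots
  else none

-- ===== PORT B =====
-- availability.get(k, []): first matching key of the association list
def dget (av : List (String × List (Int × Int))) (k : String) : List (Int × Int) :=
  ((av.find? (fun kv => kv.1 == k)).map Prod.snd).getD []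

def mergeStep (acc : List (Int × Int)) (p : Int × Int) : List (Int × Int) :=
  match acc with
  | [] => [p]
  | (c, d) :: rest =>
    if p.1 ≤ d then (if d < p.2 then (c, p.2) :: rest else (c, d) :: rest)
    else p :: (c, d) :: rest

-- _merge_busy: the accumulator is kept reversed (its head is Python's merged[-1]); reversed once at the end
def mergeBusy (busy : List (Int × Int)) : List (Int × Int) :=
  ((PySem.List.sorted busy (fun s => s.1) false).foldl mergeStep []).reverse

-- _busy_at's while loop
def bsGo (merged : List (Int × Int)) (x : Int) (lo hi : Nat) : Nat :=
  if lo < hi then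
    if (merged.getD ((lo + hi) / 2) (0, 0)).1 ≤ x then bsGo merged x ((lo + hi) / 2 + 1) hi
    else bsGo merged x lo ((lo + hi) / 2)
  else lo
termination_by hi - lo
decreasing_by all_goals omega

def busyAt (merged : List (Int × Int)) (x : Int) : Bool :=
  let lo := bsGo merged x 0 merged.length
  decide (0 < lo) && decide (x ≤ (merged.getD (lo - 1) (0, 0)).2)

def tryParticipant (av : List (String × List (Int × Int))) (slots : List (Int × Int)) (dur : Int) : Option (Int × Int) :=
  let merged := mergeBusy (dget av "busy")
  if !(slots.any (fun slot => busyAt merged slot.1)) then none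
  else ((dget av "free").find? (fun se => decide (se.2 - se.1 ≥ dur))).map (fun se => (se.1, se.1 + dur))

-- _busy_counts: participant-outer accumulation of per-slot busy counts
def busyCounts (slots : List (Int × Int)) (parts : List (String × List (String × List (Int × Int)))) : List Int :=
  parts.foldl (fun counts p =>
      let merged := mergeBusy (dget p.2 "busy")
      List.zipWith (fun c slot => if busyAt merged slot.1 then c + 1 else c) counts slots)
    (List.replicate slots.length 0)

def suggest_alternatives_alt (common_slots : List (Int × Int)) (priority : String) (participants_availability : List (String × List (String × List (Int × Int)))) (meeting_duration : Int) : Option (Int × Int) :=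
  if priority = "high" then
    participants_availability.findSome? (fun p => tryParticipant p.2 common_slots meeting_duration)
  else if ¬ (priority = "medium" ∨ priority = "low") then none
  else
    let counts := busyCounts common_slots participants_availability
    let n : Int := participants_availability.length
    if priority = "medium" then
      match ((common_slots.zip counts).find? (fun sc => decide (sc.2 = 0))).map Prod.fst with
      | some s => some s
      | none => ((common_slots.zip counts).find? (fun sc => decide (sc.2 ≤ PySem.Int.floordiv n 2))).map Prod.fst
    else
      let frees := counts.map (fun c => n - c)
      let m := frees.foldl max 0
      if m = 0 then none
      else ((common_slots.zip frees).find? (fun sf => decide (sf.2 = m))).map Prod.fst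

-- ===== PRECONDITION & SPEC =====
def Spec_suggest_alternatives (common_slots : List (Int × Int)) (priority : String) (participants_availability : List (String × List (String × List (Int × Int)))) (meeting_duration : Int) (out : Option (Int × Int)) : Prop := out = suggest_alternatives_alt common_slots priority participants_availability meeting_duration
instance (common_slots : List (Int × Int)) (priority : String) (participants_availability : List (String × List (String × List (Int × Int)))) (meeting_duration : Int) (out : Option (Int × Int)) : Decidable (Spec_suggest_alternatives common_slots priority participants_availability meeting_duration out) := by unfold Spec_suggest_alternatives; infer_instance

-- ===== CLAIM (what is proved, stated in full; the proofs are below) =====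
def Claim_equal_suggest_alternatives : Prop := ∀ (common_slots : List (Int × Int)) (priority : String) (participants_availability : List (String × List (String × List (Int × Int)))) (meeting_duration : Int), Dom_suggest_alternatives common_slots priority participants_availability meeting_duration → Spec_suggest_alternatives common_slots priority participants_availability meeting_duration (suggest_alternatives common_slots priority participants_availability meeting_duration)

-- ===== LEMMAS AND PROOFS =====

-- "point x is covered by some interval of l"
def pointIn (l : List (Int × Int)) (x : Int) : Bool :=
  l.any (fun b => decide (b.1 ≤ x ∧ x ≤ b.2))

-- invariant of the (reversed) merge accumulator: intervals separated and starts descending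
def RevOK (acc : List (Int × Int)) : Prop :=
  List.IsChain (fun p q => q.2 < p.1 ∧ q.1 ≤ p.1) acc

theorem dget_eq (av : List (String × List (Int × Int))) (k : String) :
    dget av k = dictGetD av k := by
  induction av with
  | nil => rfl
  | cons kv rest ih =>
    obtain ⟨k', v⟩ := kv
    by_cases h : k' = k
    · simp [dget, dictGetD, h]
    · have hb : (k' == k) = false := by simp [h]
      simp only [dget, dictGetD, List.find?_cons, hb, h, if_false]
      exact ih

theorem headStart_mergeStep (acc : List (Int × Int)) (p : Int × Int)
    (hhd : ∀ h, acc.head? = some h → h.1 ≤ p.1) :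
    ∀ q, (mergeStep acc p).head? = some q → q.1 ≤ p.1 := by
  match acc with
  | [] =>
    intro q hq
    simp only [mergeStep, List.head?_cons, Option.some.injEq] at hq
    cases hq; exact le_rfl
  | (c, d) :: rest =>
    have hcp : c ≤ p.1 := hhd (c, d) rfl
    intro q hq
    by_cases h1 : p.1 ≤ d
    · by_cases h2 : d < p.2 <;>
        simp only [mergeStep, h1, h2, reduceIte, List.head?_cons, Option.some.injEq] at hq <;>
        (cases hq; simpa using hcp)
    · simp only [mergeStep, h1, reduceIte, List.head?_cons, Option.some.injEq] at hq
      cases hq; exact le_rfl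

theorem revOK_mergeStep (acc : List (Int × Int)) (p : Int × Int)
    (hro : RevOK acc) (hhd : ∀ h, acc.head? = some h → h.1 ≤ p.1) :
    RevOK (mergeStep acc p) := by
  match acc with
  | [] => simp [mergeStep, RevOK]
  | (c, d) :: rest =>
    have hcp : c ≤ p.1 := hhd (c, d) rfl
    by_cases h1 : p.1 ≤ d
    · by_cases h2 : d < p.2 <;> simp only [mergeStep, h1, h2, reduceIte]
      · match rest with
        | [] => simp [RevOK]
        | r :: rs =>
          unfold RevOK at hro ⊢
          rw [List.isChain_cons_cons] at hro ⊢
          exact ⟨hro.1, hro.2⟩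
      · exact hro
    · unfold RevOK at hro ⊢
      rw [show mergeStep ((c, d) :: rest) p = p :: (c, d) :: rest by simp [mergeStep, h1]]
      rw [List.isChain_cons_cons]
      exact ⟨⟨by omega, hcp⟩, hro⟩

theorem pointIn_mergeStep (acc : List (Int × Int)) (p : Int × Int) (x : Int)
    (hhd : ∀ h, acc.head? = some h → h.1 ≤ p.1) :
    pointIn (mergeStep acc p) x = (pointIn acc x || decide (p.1 ≤ x ∧ x ≤ p.2)) := by
  match acc with
  | [] => simp [mergeStep, pointIn]
  | (c, d) :: rest =>
    have hcp : c ≤ p.1 := hhd (c, d) rfl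
    by_cases h1 : p.1 ≤ d
    · by_cases h2 : d < p.2
      · simp only [mergeStep, h1, h2, reduceIte, pointIn, List.any_cons]
        have harith : decide (c ≤ x ∧ x ≤ p.2) =
            (decide (c ≤ x ∧ x ≤ d) || decide (p.1 ≤ x ∧ x ≤ p.2)) := by
          rw [Bool.eq_iff_iff]; simp only [Bool.or_eq_true, decide_eq_true_eq]; omega
        rw [harith]; ac_rfl
      · simp only [mergeStep, h1, h2, reduceIte, pointIn, List.any_cons]
        have harith : decide (c ≤ x ∧ x ≤ d) =
            (decide (c ≤ x ∧ x ≤ d) || decide (p.1 ≤ x ∧ x ≤ p.2)) := by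
          rw [Bool.eq_iff_iff]; simp only [Bool.or_eq_true, decide_eq_true_eq]; omega
        conv_lhs => rw [harith]
        ac_rfl
    · simp only [mergeStep, h1, reduceIte, pointIn, List.any_cons]
      ac_rfl

theorem mergeFold_ok : ∀ (ss acc : List (Int × Int)),
    ss.Pairwise (fun p q => p.1 ≤ q.1) → RevOK acc →
    (∀ q ∈ ss, ∀ h : Int × Int, acc.head? = some h → h.1 ≤ q.1) →
    RevOK (ss.foldl mergeStep acc) ∧
    ∀ x, pointIn (ss.foldl mergeStep acc) x = (pointIn acc x || pointIn ss x) := by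
  intro ss
  induction ss with
  | nil => intro acc _ hro _; exact ⟨hro, fun x => by simp [pointIn]⟩
  | cons p tl ih =>
    intro acc hpw hro hhd
    rw [List.pairwise_cons] at hpw
    obtain ⟨hple, htl⟩ := hpw
    have hhdp : ∀ h : Int × Int, acc.head? = some h → h.1 ≤ p.1 :=
      fun h hh => hhd p (List.mem_cons_self) h hh
    have hro' : RevOK (mergeStep acc p) := revOK_mergeStep acc p hro hhdp
    have hhd' : ∀ q ∈ tl, ∀ h : Int × Int, (mergeStep acc p).head? = some h → h.1 ≤ q.1 := by
      intro q hq h hh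
      have := headStart_mergeStep acc p hhdp h hh
      have := hple q hq
      omega
    obtain ⟨hc1, hc2⟩ := ih (mergeStep acc p) htl hro' hhd'
    refine ⟨by simpa [List.foldl_cons] using hc1, fun x => ?_⟩
    rw [List.foldl_cons, hc2 x, pointIn_mergeStep acc p x hhdp]
    simp [pointIn, List.any_cons, Bool.or_assoc, Bool.or_comm, Bool.or_left_comm]

theorem mergeBusy_pairwise (busy : List (Int × Int)) :
    (mergeBusy busy).Pairwise (fun p q => p.2 < q.1 ∧ p.1 ≤ q.1) := by
  have h := mergeFold_ok (PySem.List.sorted busy (fun s => s.1) false) []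
    (PySem.List.sorted_pairwise busy (fun s => s.1)) (by simp [RevOK]) (by simp)
  have hchain : List.IsChain (fun p q : Int × Int => q.2 < p.1 ∧ q.1 ≤ p.1)
      ((PySem.List.sorted busy (fun s => s.1) false).foldl mergeStep []) := h.1
  unfold mergeBusy
  letI : Trans (fun p q : Int × Int => p.2 < q.1 ∧ p.1 ≤ q.1)
      (fun p q : Int × Int => p.2 < q.1 ∧ p.1 ≤ q.1)
      (fun p q : Int × Int => p.2 < q.1 ∧ p.1 ≤ q.1) :=
    ⟨fun h1 h2 => ⟨by omega, by omega⟩⟩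
  rw [← List.isChain_iff_pairwise]
  rw [List.isChain_reverse]
  exact hchain

theorem pointIn_mergeBusy (busy : List (Int × Int)) (x : Int) :
    pointIn (mergeBusy busy) x = pointIn busy x := by
  have h := mergeFold_ok (PySem.List.sorted busy (fun s => s.1) false) []
    (PySem.List.sorted_pairwise busy (fun s => s.1)) (by simp [RevOK]) (by simp)
  unfold mergeBusy pointIn
  rw [List.any_reverse]
  have := h.2 x
  unfold pointIn at this
  rw [this]
  simp
  exact (PySem.List.sorted_perm busy (fun s => s.1) false).any_eq

theorem bsGo_spec (merged : List (Int × Int)) (x : Int)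
    (hmono : ∀ i j, i < j → j < merged.length → (merged.getD i (0,0)).1 ≤ (merged.getD j (0,0)).1) :
    ∀ n lo hi, hi - lo ≤ n → lo ≤ hi → hi ≤ merged.length →
    (∀ j, j < lo → (merged.getD j (0,0)).1 ≤ x) →
    (∀ j, hi ≤ j → j < merged.length → x < (merged.getD j (0,0)).1) →
    (∀ j, j < bsGo merged x lo hi → (merged.getD j (0,0)).1 ≤ x) ∧
    (∀ j, bsGo merged x lo hi ≤ j → j < merged.length → x < (merged.getD j (0,0)).1) ∧
    bsGo merged x lo hi ≤ merged.length := by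
  intro n
  induction n with
  | zero =>
    intro lo hi hn hle hhi hlo hup
    have hnlt : ¬ lo < hi := by omega
    rw [bsGo, if_neg hnlt]
    exact ⟨hlo, fun j hj1 hj2 => hup j (by omega) hj2, by omega⟩
  | succ n ih =>
    intro lo hi hn hle hhi hlo hup
    by_cases hlt : lo < hi
    · rw [bsGo, if_pos hlt]
      have hmid1 : lo ≤ (lo + hi) / 2 := by omega
      have hmid2 : (lo + hi) / 2 < hi := by omega
      by_cases hx : (merged.getD ((lo + hi) / 2) (0,0)).1 ≤ x
      · rw [if_pos hx]
        apply ih ((lo + hi) / 2 + 1) hi (by omega) (by omega) hhi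
        · intro j hj
          rcases Nat.lt_or_ge j ((lo + hi) / 2) with hjm | hjm
          · exact le_trans (hmono j ((lo + hi) / 2) hjm (by omega)) hx
          · have : j = (lo + hi) / 2 := by omega
            rw [this]; exact hx
        · exact hup
      · rw [if_neg hx]
        apply ih lo ((lo + hi) / 2) (by omega) (by omega) (by omega) hlo
        intro j hj1 hj2
        rcases Nat.lt_or_ge ((lo + hi) / 2) j with hjm | hjm
        · exact lt_of_lt_of_le (by omega) (hmono ((lo + hi) / 2) j hjm hj2)
        · have : j = (lo + hi) / 2 := by omega
          rw [this]; omega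
    · rw [bsGo, if_neg hlt]
      exact ⟨hlo, fun j hj1 hj2 => hup j (by omega) hj2, by omega⟩

theorem busyAt_eq_pointIn (merged : List (Int × Int)) (x : Int)
    (hpw : merged.Pairwise (fun p q => p.2 < q.1 ∧ p.1 ≤ q.1)) :
    busyAt merged x = pointIn merged x := by
  have hmono : ∀ i j, i < j → j < merged.length →
      (merged.getD i (0,0)).1 ≤ (merged.getD j (0,0)).1 := by
    intro i j hij hj
    have hi : i < merged.length := lt_trans hij hj
    rw [List.getD_eq_getElem _ _ hi, List.getD_eq_getElem _ _ hj]
    exact ((List.pairwise_iff_getElem.mp hpw) i j hi hj hij).2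
  obtain ⟨h1, h2, h3⟩ := bsGo_spec merged x hmono merged.length 0 merged.length
    (by omega) (by omega) le_rfl (fun j hj => absurd hj (Nat.not_lt_zero j))
    (fun j hj1 hj2 => absurd hj2 (by omega))
  unfold busyAt
  rw [Bool.eq_iff_iff]
  simp only [Bool.and_eq_true, decide_eq_true_eq, pointIn, List.any_eq_true]
  constructor
  · rintro ⟨hrpos, hend⟩
    have hr1 : bsGo merged x 0 merged.length - 1 < merged.length := by omega
    refine ⟨merged[bsGo merged x 0 merged.length - 1], List.getElem_mem _, ?_, ?_⟩
    · have hstart := h1 (bsGo merged x 0 merged.length - 1) (by omega)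
      rwa [List.getD_eq_getElem _ _ hr1] at hstart
    · rwa [List.getD_eq_getElem _ _ hr1] at hend
  · rintro ⟨b, hb, hb1, hb2⟩
    obtain ⟨j, hj, rfl⟩ := List.getElem_of_mem hb
    have hjr : j < bsGo merged x 0 merged.length := by
      by_contra h
      have := h2 j (by omega) hj
      rw [List.getD_eq_getElem _ _ hj] at this; omega
    have hrpos : 0 < bsGo merged x 0 merged.length := by omega
    refine ⟨hrpos, ?_⟩
    have hr1 : bsGo merged x 0 merged.length - 1 < merged.length := by omega
    rw [List.getD_eq_getElem _ _ hr1]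
    by_cases hje : j = bsGo merged x 0 merged.length - 1
    · have heq : merged[bsGo merged x 0 merged.length - 1]'hr1 = merged[j]'hj := by
        congr 1
        omega
      rw [heq]; exact hb2
    · have hjlt : j < bsGo merged x 0 merged.length - 1 := by omega
      have hsep := (List.pairwise_iff_getElem.mp hpw) j
        (bsGo merged x 0 merged.length - 1) hj hr1 hjlt
      have hstart := h1 (bsGo merged x 0 merged.length - 1) (by omega)
      rw [List.getD_eq_getElem _ _ hr1] at hstart
      omega

theorem busyAt_mergeBusy (busy : List (Int × Int)) (x : Int) :
    busyAt (mergeBusy busy) x = pointIn busy x := by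
  rw [busyAt_eq_pointIn _ _ (mergeBusy_pairwise busy), pointIn_mergeBusy]

theorem conflict_swap (slots busy : List (Int × Int)) :
    slots.any (fun s => pointIn busy s.1) = busy.any (pvConflictA slots) := by
  rw [Bool.eq_iff_iff]
  simp only [List.any_eq_true]
  simp only [pointIn, pvConflictA, List.any_eq_true, decide_eq_true_eq]
  constructor
  · rintro ⟨s, hs, b, hb, h⟩; exact ⟨b, hb, s, hs, h⟩
  · rintro ⟨b, hb, s, hs, h⟩; exact ⟨s, hs, b, hb, h⟩

theorem busyAt_mergeBusy_any (l : List (Int × Int)) (x : Int) :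
    busyAt (mergeBusy l) x = l.any (fun b => decide (b.1 ≤ x ∧ x ≤ b.2)) := by
  rw [busyAt_mergeBusy]; rfl

theorem ffind_eq (dur : Int) : ∀ free : List (Int × Int),
    (free.find? (fun se => decide (se.2 - se.1 ≥ dur))).map (fun se => (se.1, se.1 + dur)) =
      ffsGo free dur := by
  intro free
  induction free with
  | nil => rfl
  | cons h t ih =>
    obtain ⟨s, e⟩ := h
    by_cases hd : e - s ≥ dur
    · simp [ffsGo, List.find?_cons, hd]
    · simp only [ffsGo, List.find?_cons]
      simp [hd, ih]

theorem tryPart_eq (slots : List (Int × Int)) (dur : Int) (av : List (String × List (Int × Int))) :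
    tryParticipant av slots dur =
      (if (dictGetD av "busy").any (pvConflictA slots) then find_free_slot av dur else none) := by
  have hc : (slots.any (fun slot => busyAt (mergeBusy (dget av "busy")) slot.1)) =
      (dictGetD av "busy").any (pvConflictA slots) := by
    rw [← conflict_swap]
    apply PySem.List.any_congr_mem
    intro s _
    rw [dget_eq, busyAt_mergeBusy]
  have hff : ((dget av "free").find? (fun se => decide (se.2 - se.1 ≥ dur))).map
      (fun se => (se.1, se.1 + dur)) = find_free_slot av dur := by
    rw [dget_eq, ffind_eq]; rfl
  simp only [tryParticipant]
  rw [hc, hff]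
  cases (dictGetD av "busy").any (pvConflictA slots) <;> simp

theorem highGo_none (slots : List (Int × Int)) (av : List (String × List (Int × Int))) (dur : Int)
    (hffs : find_free_slot av dur = none) :
    ∀ lst i, highGo slots av dur lst i = none := by
  intro lst i
  fun_induction highGo slots av dur lst i <;> simp_all

theorem highGo_some (slots : List (Int × Int)) (av : List (String × List (Int × Int))) (dur : Int)
    (v : Int × Int) (hffs : find_free_slot av dur = some v) :
    ∀ lst i, highGo slots av dur lst i =
      if (lst.drop i).any (pvConflictA slots) then some v else none := by
  intro lst i
  fun_induction highGo slots av dur lst i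
  next lst i h hconf v' heq =>
    rw [List.drop_eq_getElem_cons h, List.any_cons, hconf]
    rw [hffs] at heq
    simp at heq
    simp [heq]
  next lst i h hconf heq ih =>
    rw [hffs] at heq
    exact absurd heq (by simp)
  next lst i h hconf ih =>
    rw [List.drop_eq_getElem_cons h, List.any_cons]
    simp only [hconf, Bool.false_or]
    exact ih
  next lst i h =>
    rw [List.drop_eq_nil_of_le (by omega), List.any_nil]
    simp

theorem highGo_eq (slots : List (Int × Int)) (av : List (String × List (Int × Int))) (dur : Int)
    (lst : List (Int × Int)) :
    highGo slots av dur lst 0 =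
      if lst.any (pvConflictA slots) then find_free_slot av dur else none := by
  cases hffs : find_free_slot av dur with
  | none => rw [highGo_none slots av dur hffs]; split <;> rfl
  | some v => rw [highGo_some slots av dur v hffs]; simp

theorem high_eq (slots : List (Int × Int)) (dur : Int) :
    ∀ parts, highLoop slots dur parts = parts.findSome? (fun p => tryParticipant p.2 slots dur) := by
  intro parts
  induction parts with
  | nil => rfl
  | cons p rest ih =>
    obtain ⟨name, av⟩ := p
    show (match highGo slots av dur (dictGetD av "busy") 0 with
          | some v => some v
          | none => highLoop slots dur rest) = _
    rw [highGo_eq, List.findSome?_cons, tryPart_eq]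
    cases hc : (dictGetD av "busy").any (pvConflictA slots) with
    | false => simpa using ih
    | true =>
      cases hf : find_free_slot av dur with
      | none => simpa using ih
      | some v => simp

-- counting helpers: both of A's per-slot counters are countP's
theorem unavailCount_eq_countP (parts : List (String × List (String × List (Int × Int)))) (x : Int) :
    unavailCount parts x =
      ((parts.countP (fun p => (dictGetD p.2 "busy").any (fun b => decide (b.1 ≤ x ∧ x ≤ b.2)))) : Int) := by
  simpa using PySem.List.foldl_if_add_one
    (fun p : String × List (String × List (Int × Int)) =>
      (dictGetD p.2 "busy").any (fun b => decide (b.1 ≤ x ∧ x ≤ b.2))) parts 0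

theorem availCount_eq (parts : List (String × List (String × List (Int × Int)))) (x : Int) :
    availCount parts x = (parts.length : Int) - unavailCount parts x := by
  unfold availCount
  have hcongr : parts.foldl (fun (c : Int) p =>
        if (dictGetD p.2 "busy").any (fun b => decide (b.1 ≤ x ∧ x ≤ b.2)) then c else c + 1) 0
      = parts.foldl (fun (c : Int) p =>
        if !((dictGetD p.2 "busy").any (fun b => decide (b.1 ≤ x ∧ x ≤ b.2))) then c + 1 else c) 0 := by
    apply PySem.List.foldl_congr_mem
    intro acc p _
    cases h : (dictGetD p.2 "busy").any (fun b => decide (b.1 ≤ x ∧ x ≤ b.2)) <;> simp [h]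
  rw [unavailCount_eq_countP]
  refine hcongr.trans ?_
  rw [PySem.List.foldl_if_add_one]
  have := List.length_eq_countP_add_countP
    (fun p : String × List (String × List (Int × Int)) =>
      (dictGetD p.2 "busy").any (fun b => decide (b.1 ≤ x ∧ x ≤ b.2))) (l := parts)
  have hc : parts.countP (fun p => !((dictGetD p.2 "busy").any (fun b => decide (b.1 ≤ x ∧ x ≤ b.2)))) =
      parts.countP (fun p => ¬ ((dictGetD p.2 "busy").any (fun b => decide (b.1 ≤ x ∧ x ≤ b.2)) = true)) := by
    apply List.countP_congr
    intro p _
    cases (dictGetD p.2 "busy").any (fun b => decide (b.1 ≤ x ∧ x ≤ b.2)) <;> simp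
  omega

theorem zipWith_comp (f g : Int → (Int × Int) → Int) :
    ∀ (a : List Int) (b : List (Int × Int)),
      List.zipWith f (List.zipWith g a b) b = List.zipWith (fun c s => f (g c s) s) a b := by
  intro a
  induction a with
  | nil => intro b; simp
  | cons x t ih =>
    intro b
    cases b with
    | nil => simp
    | cons y u => simp [ih]

theorem zipWith_const_left : ∀ (a : List Int) (b : List (Int × Int)), a.length = b.length →
    List.zipWith (fun c (_ : Int × Int) => c) a b = a := by
  intro a
  induction a with
  | nil => intro b _; simp
  | cons x t ih =>
    intro b hb
    cases b with
    | nil => simp at hb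
    | cons y u => simp at hb; simp [ih u hb]

theorem zipWith_replicate_zero (f : (Int × Int) → Int) : ∀ (b : List (Int × Int)),
    List.zipWith (fun c s => c + f s) (List.replicate b.length 0) b = b.map f := by
  intro b
  induction b with
  | nil => simp
  | cons y u ih => simp [List.replicate_succ, ih]

theorem countsGen (slots : List (Int × Int)) :
    ∀ (parts : List (String × List (String × List (Int × Int)))) (acc : List Int),
      acc.length = slots.length →
      parts.foldl (fun counts p =>
          let merged := mergeBusy (dget p.2 "busy")
          List.zipWith (fun c slot => if busyAt merged slot.1 then c + 1 else c) counts slots) acc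
        = List.zipWith (fun c s => c + unavailCount parts s.1) acc slots := by
  intro parts
  induction parts with
  | nil =>
    intro acc hlen
    have : (fun (c : Int) (s : Int × Int) => c + unavailCount [] s.1) =
        (fun (c : Int) (_ : Int × Int) => c) := by
      funext c s; simp [unavailCount]
    rw [List.foldl_nil, this, zipWith_const_left acc slots hlen]
  | cons p rest ih =>
    intro acc hlen
    rw [List.foldl_cons]
    have hlen' : (List.zipWith (fun c slot => if busyAt (mergeBusy (dget p.2 "busy")) slot.1 then c + 1 else c) acc slots).length = slots.length := by
      simp [List.length_zipWith, hlen]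
    rw [ih _ hlen', zipWith_comp]
    have hfun : (fun (c : Int) (s : Int × Int) =>
        (if busyAt (mergeBusy (dget p.2 "busy")) s.1 then c + 1 else c) + unavailCount rest s.1) =
        (fun (c : Int) (s : Int × Int) => c + unavailCount (p :: rest) s.1) := by
      funext c s
      rw [unavailCount_eq_countP, unavailCount_eq_countP, List.countP_cons,
          dget_eq, busyAt_mergeBusy_any]
      cases h : (dictGetD p.2 "busy").any (fun b => decide (b.1 ≤ s.1 ∧ s.1 ≤ b.2)) <;>
        simp [h] <;> push_cast <;> ring
    rw [hfun]

theorem busyCounts_eq (slots : List (Int × Int)) (parts : List (String × List (String × List (Int × Int)))) :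
    busyCounts slots parts = slots.map (fun s => unavailCount parts s.1) := by
  unfold busyCounts
  rw [countsGen slots parts (List.replicate slots.length 0) (by simp)]
  exact zipWith_replicate_zero _ slots

theorem zip_map_find? (g : (Int × Int) → Int) (p : Int → Bool) :
    ∀ slots : List (Int × Int),
      ((slots.zip (slots.map g)).find? (fun sc => p sc.2)).map Prod.fst =
        slots.find? (fun s => p (g s)) := by
  intro slots
  induction slots with
  | nil => rfl
  | cons s rest ih =>
    simp only [List.map_cons, List.zip_cons_cons, List.find?_cons]
    cases hp : p (g s) <;> simp [hp, ih]

theorem medGen (parts : List (String × List (String × List (Int × Int)))) (half : Int) :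
    ∀ (slots acc : List (Int × Int)),
      medLoop parts half acc slots =
        (match slots.find? (fun s => decide (unavailCount parts s.1 = 0)) with
         | some s => some s
         | none =>
           match acc.head? with
           | some a => some a
           | none => slots.find? (fun s => decide (unavailCount parts s.1 ≤ half))) := by
  intro slots
  induction slots with
  | nil =>
    intro acc
    cases acc <;> simp [medLoop]
  | cons slot rest ih =>
    intro acc
    show (if unavailCount parts slot.1 = 0 then some slot
          else if unavailCount parts slot.1 ≤ half then medLoop parts half (acc ++ [slot]) rest
          else medLoop parts half acc rest) = _
    by_cases h0 : unavailCount parts slot.1 = 0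
    · rw [if_pos h0, List.find?_cons_of_pos (by simpa using h0)]
    · rw [if_neg h0, List.find?_cons_of_neg (by simpa using h0)]
      by_cases hh : unavailCount parts slot.1 ≤ half
      · rw [if_pos hh, ih (acc ++ [slot]), List.find?_cons_of_pos (by simpa using hh)]
        cases hf : rest.find? (fun s => decide (unavailCount parts s.1 = 0)) <;>
          cases acc <;> simp
      · rw [if_neg hh, ih acc, List.find?_cons_of_neg (by simpa using hh)]

theorem lowGen (parts : List (String × List (String × List (Int × Int)))) :
    ∀ (slots : List (Int × Int)) (best : Option (Int × Int)) (maxAv : Int),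
      lowLoop parts best maxAv slots =
        (if (slots.map (fun s => availCount parts s.1)).foldl max maxAv = maxAv then best
         else slots.find? (fun s =>
           decide (availCount parts s.1 = (slots.map (fun s => availCount parts s.1)).foldl max maxAv))) := by
  intro slots
  induction slots with
  | nil => intro best maxAv; simp [lowLoop]
  | cons slot rest ih =>
    intro best maxAv
    have hstep : ((slot :: rest).map (fun s => availCount parts s.1)).foldl max maxAv =
        (rest.map (fun s => availCount parts s.1)).foldl max (max maxAv (availCount parts slot.1)) := by
      simp
    show (if availCount parts slot.1 > maxAv then lowLoop parts (some slot) (availCount parts slot.1) rest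
          else lowLoop parts best maxAv rest) = _
    by_cases hgt : availCount parts slot.1 > maxAv
    · rw [if_pos hgt, ih (some slot) (availCount parts slot.1)]
      have hmx : max maxAv (availCount parts slot.1) = availCount parts slot.1 := by omega
      rw [hstep, hmx]
      have hge := (PySem.List.le_foldl_max (rest.map (fun s => availCount parts s.1))
        (availCount parts slot.1)).1
      set M := (rest.map (fun s => availCount parts s.1)).foldl max (availCount parts slot.1) with hM
      have hMne : ¬ M = maxAv := by omega
      rw [if_neg hMne]
      by_cases he : availCount parts slot.1 = M
      · rw [List.find?_cons_of_pos (by simpa using he), if_pos he.symm]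
      · rw [List.find?_cons_of_neg (by simpa using he), if_neg (fun h => he h.symm)]
    · rw [if_neg hgt, ih best maxAv]
      have hmx : max maxAv (availCount parts slot.1) = maxAv := by omega
      rw [hstep, hmx]
      have hge := (PySem.List.le_foldl_max (rest.map (fun s => availCount parts s.1)) maxAv).1
      set M := (rest.map (fun s => availCount parts s.1)).foldl max maxAv with hM
      by_cases hMe : M = maxAv
      · rw [if_pos hMe, if_pos hMe]
      · rw [if_neg hMe, if_neg hMe]
        rw [List.find?_cons_of_neg (by simp only [decide_eq_true_eq]; omega)]

-- ===== VERDICT (by name: the statement is the Claim_ definition above) =====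
theorem suggest_alternatives_spec : Claim_equal_suggest_alternatives := by
  intro cs pr parts dur _
  unfold Spec_suggest_alternatives suggest_alternatives suggest_alternatives_alt
  by_cases h1 : pr = "high"
  · simp only [h1, reduceIte]
    exact high_eq cs dur parts
  · by_cases h2 : pr = "medium"
    · subst h2
      simp only [reduceIte, String.reduceEq, not_or, not_false_iff, true_or, and_self,
        if_false, if_true, not_true, false_and]
      rw [busyCounts_eq, medGen parts (PySem.Int.floordiv (parts.length : Int) 2) cs [],
        zip_map_find? (fun s => unavailCount parts s.1) (fun c => decide (c = 0)),
        zip_map_find? (fun s => unavailCount parts s.1)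
          (fun c => decide (c ≤ PySem.Int.floordiv (parts.length : Int) 2))]
      cases cs.find? (fun s => decide (unavailCount parts s.1 = 0)) <;> simp
    · by_cases h3 : pr = "low"
      · subst h3
        simp only [reduceIte, String.reduceEq, false_or, or_true, not_true, not_false_iff]
        rw [busyCounts_eq, lowGen parts cs none 0]
        have hmap : List.map (fun c => (parts.length : Int) - c)
              (List.map (fun s => unavailCount parts s.1) cs) =
            cs.map (fun s => availCount parts s.1) := by
          rw [List.map_map]
          apply List.map_congr_left
          intro s _
          simp [availCount_eq]
        rw [hmap]
        set M := (cs.map (fun s => availCount parts s.1)).foldl max 0 with hM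
        by_cases hM0 : M = 0
        · rw [if_pos hM0, if_pos hM0]
        · rw [if_neg hM0, if_neg hM0,
            zip_map_find? (fun s => availCount parts s.1) (fun c => decide (c = M))]
      · simp [h1, h2, h3]
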